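-- pv_equiv track=rewrite | github.com/FedericoSorianox/Thebadgerspage | backend/core/models.py | generar_nombres_rondas
-- ===== SOURCE A (Python) =====
-- def generar_nombres_rondas(num_rondas):
--     """Genera nombres apropiados para las rondas según el número total"""
--     nombres = []
--     for i in range(num_rondas):
--         if i == num_rondas - 1:  # Última ronda
--             nombres.append('Final')
--         elif i == num_rondas - 2:  # Penúltima ronda
--             nombres.append('Semifinal')
--         elif i == num_rondas - 3:  # Antepenúltima ronda
--             nombres.append('Cuartos de Final')
--         else:
--             nombres.append(f'Ronda {i + 1}')
--     return nombres
-- ===== SOURCE B (Python) =====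
-- def generar_nombres_rondas(num_rondas):
--     """Genera nombres apropiados para las rondas según el número total"""
--     especiales = ['Cuartos de Final', 'Semifinal', 'Final']
--     k = max(0, min(num_rondas, 3))
--     return [f'Ronda {i}' for i in range(1, num_rondas - k + 1)] + especiales[3 - k:]
-- ===== Notes on version B (the rewrite author's own statement) =====
-- stated objective: alternative
-- what changed: B has no per-element branching at all: it concatenates a branch-free 'Ronda i' comprehension over range(1, n-k+1) with a suffix sliced off a constant list of the three special names, where k = max(0, min(n, 3)) counts the special rounds.
import Mathlib
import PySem

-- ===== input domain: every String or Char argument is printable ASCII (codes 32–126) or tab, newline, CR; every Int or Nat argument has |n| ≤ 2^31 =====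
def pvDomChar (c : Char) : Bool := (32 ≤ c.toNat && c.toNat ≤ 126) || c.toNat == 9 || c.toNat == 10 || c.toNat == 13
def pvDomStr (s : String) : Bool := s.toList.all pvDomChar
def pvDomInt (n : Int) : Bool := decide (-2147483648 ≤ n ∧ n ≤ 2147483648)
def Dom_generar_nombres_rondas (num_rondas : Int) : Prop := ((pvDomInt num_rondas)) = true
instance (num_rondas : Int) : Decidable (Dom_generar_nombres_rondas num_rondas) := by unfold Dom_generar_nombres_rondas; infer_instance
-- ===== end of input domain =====

-- B drops A's per-element 4-way branch: it concatenates a generic 'Ronda i' prefix with a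
-- suffix sliced off the constant list of the three special names (alternative decomposition).

-- ===== PORT A =====
def generar_nombres_rondas (num_rondas : Int) : List String :=
  (PySem.List.pyRange 0 num_rondas 1).foldl (fun nombres i =>
    if i = num_rondas - 1 then nombres ++ ["Final"]
    else if i = num_rondas - 2 then nombres ++ ["Semifinal"]
    else if i = num_rondas - 3 then nombres ++ ["Cuartos de Final"]
    else nombres ++ ["Ronda " ++ PySem.Int.toStr (i + 1)]) []

-- ===== PORT B =====
def generar_nombres_rondas_alt (num_rondas : Int) : List String :=
  let especiales : List String := ["Cuartos de Final", "Semifinal", "Final"]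
  let k : Int := max 0 (min num_rondas 3)
  ((PySem.List.pyRange 1 (num_rondas - k + 1) 1).map (fun i => "Ronda " ++ PySem.Int.toStr i))
    ++ PySem.List.slice especiales (some (3 - k)) none

-- ===== PRECONDITION & SPEC =====
def Spec_generar_nombres_rondas (num_rondas : Int) (out : List String) : Prop := out = generar_nombres_rondas_alt num_rondas
instance (num_rondas : Int) (out : List String) : Decidable (Spec_generar_nombres_rondas num_rondas out) := by unfold Spec_generar_nombres_rondas; infer_instance

-- ===== CLAIM (what is proved, stated in full; the proofs are below) =====
def Claim_equal_generar_nombres_rondas : Prop := ∀ (num_rondas : Int), Dom_generar_nombres_rondas num_rondas → Spec_generar_nombres_rondas num_rondas (generar_nombres_rondas num_rondas)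

-- ===== LEMMAS AND PROOFS =====

theorem foldl_append_singleton {α β : Type} (f : α → β) (xs : List α) (acc : List β) :
    xs.foldl (fun a x => a ++ [f x]) acc = acc ++ xs.map f := by
  induction xs generalizing acc with
  | nil => simp
  | cons x xs ih => simp [List.foldl, ih]

theorem A_eq_map (n : Int) :
    generar_nombres_rondas n = (PySem.List.pyRange 0 n 1).map (fun i =>
      if i = n - 1 then "Final"
      else if i = n - 2 then "Semifinal"
      else if i = n - 3 then "Cuartos de Final"
      else "Ronda " ++ PySem.Int.toStr (i + 1)) := by
  unfold generar_nombres_rondas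
  have h : (fun (nombres : List String) (i : Int) =>
      if i = n - 1 then nombres ++ ["Final"]
      else if i = n - 2 then nombres ++ ["Semifinal"]
      else if i = n - 3 then nombres ++ ["Cuartos de Final"]
      else nombres ++ ["Ronda " ++ PySem.Int.toStr (i + 1)]) =
      (fun nombres i => nombres ++ [if i = n - 1 then "Final"
      else if i = n - 2 then "Semifinal"
      else if i = n - 3 then "Cuartos de Final"
      else "Ronda " ++ PySem.Int.toStr (i + 1)]) := by
    funext acc i; split_ifs <;> rfl
  rw [h, foldl_append_singleton]
  simp

-- ===== VERDICT (by name: the statement is the Claim_ definition above) =====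
theorem generar_nombres_rondas_spec : Claim_equal_generar_nombres_rondas := by
  intro n _
  unfold Spec_generar_nombres_rondas generar_nombres_rondas_alt
  rw [A_eq_map]
  simp only []
  by_cases h3 : 3 ≤ n
  · have hk : max 0 (min n 3) = 3 := by omega
    rw [hk]
    have h1 : n - 3 + 1 = n - 2 := by omega
    have h2 : (3 : Int) - 3 = 0 := by omega
    rw [h1, h2]
    rw [PySem.List.pyRange_one_append 0 (n - 3) n (by omega) (by omega), List.map_append]
    congr 1
    · rw [PySem.List.pyRange_one 0 (n - 3), PySem.List.pyRange_one 1 (n - 2),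
        List.map_map, List.map_map]
      have hlen : (n - 3 - 0).toNat = (n - 2 - 1).toNat := by omega
      rw [hlen]
      apply List.map_congr_left
      intro k hk'
      simp only [List.mem_range] at hk'
      have hklt : (k : Int) < n - 3 := by omega
      simp only [Function.comp_apply]
      rw [if_neg (by omega), if_neg (by omega), if_neg (by omega)]
      have e : (0 : Int) + (k : Int) + 1 = 1 + (k : Int) := by omega
      rw [e]
    · rw [PySem.List.pyRange_one_cons (by omega : n - 3 < n),
        PySem.List.pyRange_one_cons (by omega : n - 3 + 1 < n),
        PySem.List.pyRange_one_cons (by omega : n - 3 + 1 + 1 < n),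
        PySem.List.pyRange_one_eq_nil (by omega : n ≤ n - 3 + 1 + 1 + 1)]
      simp only [List.map_cons, List.map_nil]
      have hs : PySem.List.slice ["Cuartos de Final", "Semifinal", "Final"] (some 0) none
          = ["Cuartos de Final", "Semifinal", "Final"] := by
        simp [PySem.List.slice_zero_start, PySem.List.slice_none_none]
      rw [hs]
      split_ifs <;> first | rfl | omega
  · have : n = 2 ∨ n = 1 ∨ n ≤ 0 := by omega
    rcases this with h | h | h
    · subst h; decide
    · subst h; decide
    · have hk : max 0 (min n 3) = 0 := by omega
      rw [hk,
        PySem.List.pyRange_one_eq_nil (by omega : n ≤ 0),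
        PySem.List.pyRange_one_eq_nil (by omega : n - 0 + 1 ≤ 1)]
      simp [PySem.List.slice]
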